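-- pv_equiv track=rewrite | github.com/TulioBreyner/Analise-de-algoritmos | prova/C.py | ordena
-- ===== SOURCE A (Python) =====
-- def merge_sort(arr):
--     if len(arr) <= 1:
--         return arr
--     mid = len(arr) // 2
--     left = merge_sort(arr[:mid])
--     right = merge_sort(arr[mid:])
--     return merge(left, right)
--
-- def merge(left, right):
--     res = []
--     i = j = 0
--     while i < len(left) and j < len(right):
--         if left[i] <= right[j]:
--             res.append(left[i])
--             i += 1
--         else:
--             res.append(right[j])
--             j += 1
--     res.extend(left[i:])
--     res.extend(right[j:])
--     return res
--
-- def ordena(lista):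
--     impares = []
--     pares = []
--     for i in lista:
--         if i%2 == 0:
--             pares.append(i)
--         else:
--             impares.append(i)
--
--     impares = merge_sort(impares)
--     pares =merge_sort(pares)
--
--     return impares+pares
-- ===== SOURCE B (Python) =====
-- def ordena(lista):
--     s = sorted(lista)
--     return [x for x in s if x % 2] + [x for x in s if x % 2 == 0]
-- ===== Notes on version B (the rewrite author's own statement) =====
-- stated objective: simpler
-- what changed: B sorts the whole list once with the built-in sort and then partitions the sorted list by parity, instead of A's partition-first then hand-written merge sort of each half.
import Mathlib
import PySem

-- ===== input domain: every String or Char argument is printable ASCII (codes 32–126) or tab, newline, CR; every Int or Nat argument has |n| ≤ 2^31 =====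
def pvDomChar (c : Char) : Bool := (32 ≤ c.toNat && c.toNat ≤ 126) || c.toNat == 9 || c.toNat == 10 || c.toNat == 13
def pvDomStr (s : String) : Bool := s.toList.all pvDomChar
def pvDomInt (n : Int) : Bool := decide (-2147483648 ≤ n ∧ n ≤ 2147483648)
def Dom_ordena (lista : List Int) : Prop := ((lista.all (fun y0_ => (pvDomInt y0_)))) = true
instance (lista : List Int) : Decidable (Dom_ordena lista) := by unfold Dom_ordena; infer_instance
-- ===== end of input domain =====

-- B replaces A's partition-then-merge-sort-each-half by one built-in sort of the whole
-- list followed by a parity partition of the sorted list (simpler decomposition).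

-- ===== PORT A =====
-- merge(left, right): the index-based while loop, ported as structural recursion over
-- the same two lists (res.extend(left[i:]) / res.extend(right[j:]) are the base cases)
def mergePy : List Int → List Int → List Int
  | [], right => right
  | left, [] => left
  | a :: l, b :: r =>
      if a ≤ b then a :: mergePy l (b :: r) else b :: mergePy (a :: l) r

-- merge_sort(arr); arr[:mid] / arr[mid:] with mid = len(arr)//2 are take/drop
-- (PySem.List.slice_to_natCast / slice_from_natCast, exact for natural mid)
def mergeSortPy (arr : List Int) : List Int :=
  if arr.length ≤ 1 then arr
  else
    let mid := arr.length / 2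
    mergePy (mergeSortPy (arr.take mid)) (mergeSortPy (arr.drop mid))
termination_by arr.length
decreasing_by
  · simp only [List.length_take]; omega
  · simp only [List.length_drop]; omega

def ordena (lista : List Int) : List Int :=
  let acc := lista.foldl
    (fun (acc : List Int × List Int) i =>
      if PySem.Int.mod i 2 = 0 then (acc.1, acc.2 ++ [i]) else (acc.1 ++ [i], acc.2))
    ([], [])
  mergeSortPy acc.1 ++ mergeSortPy acc.2

-- ===== PORT B =====
def ordena_alt (lista : List Int) : List Int :=
  let s := PySem.List.sorted lista (fun x => x) false
  s.filter (fun x => !(PySem.Int.mod x 2 == 0)) ++ s.filter (fun x => PySem.Int.mod x 2 == 0)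

-- ===== PRECONDITION & SPEC =====
def Spec_ordena (lista : List Int) (out : List Int) : Prop := out = ordena_alt lista
instance (lista : List Int) (out : List Int) : Decidable (Spec_ordena lista out) := by unfold Spec_ordena; infer_instance

-- ===== CLAIM (what is proved, stated in full; the proofs are below) =====
def Claim_equal_ordena : Prop := ∀ (lista : List Int), Dom_ordena lista → Spec_ordena lista (ordena lista)

-- ===== LEMMAS AND PROOFS =====

theorem mergePy_perm (l r : List Int) : (mergePy l r).Perm (l ++ r) := by
  induction l generalizing r with
  | nil => simp [mergePy]
  | cons a l ih =>
    induction r with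
    | nil => simp [mergePy]
    | cons b r ihr =>
      simp only [mergePy]
      split
      · exact (ih (b :: r)).cons a
      · exact (ihr.cons b).trans List.perm_middle.symm

theorem mergePy_pairwise {l r : List Int}
    (hl : l.Pairwise (· ≤ ·)) (hr : r.Pairwise (· ≤ ·)) :
    (mergePy l r).Pairwise (· ≤ ·) := by
  induction l generalizing r with
  | nil => simpa [mergePy] using hr
  | cons a l ih =>
    induction r with
    | nil => simpa [mergePy] using hl
    | cons b r ihr =>
      simp only [mergePy]
      rcases List.pairwise_cons.mp hl with ⟨ha, hl'⟩
      rcases List.pairwise_cons.mp hr with ⟨hb, hr'⟩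
      split
      · rename_i hab
        refine List.pairwise_cons.mpr ⟨?_, ih hl' hr⟩
        intro y hy
        have hm : y ∈ l ∨ y = b ∨ y ∈ r := by
          simpa using (mergePy_perm l (b :: r)).mem_iff.mp hy
        rcases hm with h | h | h
        · exact ha _ h
        · exact h ▸ hab
        · exact le_trans hab (hb _ h)
      · rename_i hab
        have hba : b ≤ a := le_of_not_ge hab
        refine List.pairwise_cons.mpr ⟨?_, ihr hr'⟩
        intro y hy
        have hm : y = a ∨ y ∈ l ∨ y ∈ r := by
          simpa using (mergePy_perm (a :: l) r).mem_iff.mp hy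
        rcases hm with h | h | h
        · exact h ▸ hba
        · exact le_trans hba (ha _ h)
        · exact hb _ h

theorem mergeSortPy_perm (arr : List Int) : (mergeSortPy arr).Perm arr := by
  rw [mergeSortPy]
  split
  · exact List.Perm.refl _
  · refine ((mergePy_perm _ _).trans ?_)
    have h1 := mergeSortPy_perm (arr.take (arr.length / 2))
    have h2 := mergeSortPy_perm (arr.drop (arr.length / 2))
    simpa using (h1.append h2).trans (by rw [List.take_append_drop])
termination_by arr.length
decreasing_by
  · simp only [List.length_take]; omega
  · simp only [List.length_drop]; omega

theorem mergeSortPy_pairwise (arr : List Int) : (mergeSortPy arr).Pairwise (· ≤ ·) := by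
  rw [mergeSortPy]
  split
  · rename_i h
    rcases arr with _ | ⟨a, _ | ⟨b, t⟩⟩
    · simp
    · simp
    · simp at h
  · exact mergePy_pairwise (mergeSortPy_pairwise _) (mergeSortPy_pairwise _)
termination_by arr.length
decreasing_by
  · simp only [List.length_take]; omega
  · simp only [List.length_drop]; omega

-- the hand-written merge sort computes exactly sorted(xs)
theorem mergeSortPy_eq_sorted (xs : List Int) :
    mergeSortPy xs = PySem.List.sorted xs (fun x => x) false :=
  (PySem.List.sorted_id_eq_of_perm_of_pairwise xs (mergeSortPy xs) (mergeSortPy_perm xs)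
    (mergeSortPy_pairwise xs)).symm

-- filtering a sorted list = sorting the filtered list
theorem filter_sorted_eq (xs : List Int) (p : Int → Bool) :
    (PySem.List.sorted xs (fun x => x) false).filter p
      = PySem.List.sorted (xs.filter p) (fun x => x) false :=
  (PySem.List.sorted_id_eq_of_perm_of_pairwise (xs.filter p) _
    ((PySem.List.sorted_perm xs (fun x => x) false).filter p)
    ((PySem.List.sorted_pairwise xs (fun x => x)).filter p)).symm

-- A's partition loop builds exactly the two parity filters
theorem ordena_foldl_filter (lista : List Int) (a b : List Int) :
    lista.foldl
      (fun (acc : List Int × List Int) i =>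
        if PySem.Int.mod i 2 = 0 then (acc.1, acc.2 ++ [i]) else (acc.1 ++ [i], acc.2))
      (a, b)
    = (a ++ lista.filter (fun x => !(PySem.Int.mod x 2 == 0)),
       b ++ lista.filter (fun x => PySem.Int.mod x 2 == 0)) := by
  induction lista generalizing a b with
  | nil => simp
  | cons x xs ih =>
    simp only [List.foldl_cons, List.filter_cons]
    by_cases h : PySem.Int.mod x 2 = 0
    · have hd : (2 : Int) ∣ x := (PySem.Int.mod_eq_zero_iff_dvd x 2).mp h
      simp only [if_pos h]
      rw [ih]
      simp [hd, List.append_assoc]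
    · have hm : x % 2 = 1 := by
        have := PySem.Int.mod_eq_emod_of_pos (a := x) (b := 2) (by norm_num)
        omega
      simp only [if_neg h]
      rw [ih]
      simp [hm, List.append_assoc]

-- ===== VERDICT (by name: the statement is the Claim_ definition above) =====
theorem ordena_spec : Claim_equal_ordena := by
  intro lista _
  show ordena lista = ordena_alt lista
  unfold ordena ordena_alt
  rw [ordena_foldl_filter]
  simp only [List.nil_append]
  rw [mergeSortPy_eq_sorted, mergeSortPy_eq_sorted, filter_sorted_eq, filter_sorted_eq]
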